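-- pv_equiv track=rewrite | github.com/VeselinVatrachki/SoftUni | Python_Fundamentls/29_text_processing_exercise/10_winning_ticket.py | checking_ticket
-- ===== SOURCE A (Python) =====
-- def checking_ticket(ticket):
--     if len(ticket) != 20:
--         return "invalid ticket"
--     winning_symbol = ["@", "#", "$", "^"]
--     left_part = ticket[:10]
--     right_part = ticket[10:]
--     for current_winning_symbol in winning_symbol:
--         for uninterrupted_winning_symbol in range(10, 5, -1):
--             winning_symbol_repetition = current_winning_symbol * uninterrupted_winning_symbol
--             if winning_symbol_repetition in left_part and winning_symbol_repetition in right_part: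
--                 if uninterrupted_winning_symbol == 10:
--                     return f'ticket "{ticket}" - {uninterrupted_winning_symbol}{current_winning_symbol} Jackpot!'
--                 return f'ticket "{ticket}" - {uninterrupted_winning_symbol}{current_winning_symbol}'
--     return f'ticket "{ticket}" - no match'
-- ===== SOURCE B (Python) =====
-- def _max_run(symbol, part):
--     best = cur = 0
--     for ch in part:
--         cur = cur + 1 if ch == symbol else 0
--         best = max(best, cur)
--     return best
--
--
-- def checking_ticket(ticket):
--     if len(ticket) != 20:
--         return "invalid ticket"
--     left, right = ticket[:10], ticket[10:]
--     for symbol in "@#$^":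
--         m = min(_max_run(symbol, left), _max_run(symbol, right))
--         if m == 10:
--             return f'ticket "{ticket}" - {m}{symbol} Jackpot!'
--         if m >= 6:
--             return f'ticket "{ticket}" - {m}{symbol}'
--     return f'ticket "{ticket}" - no match'
-- ===== Notes on version B (the rewrite author's own statement) =====
-- stated objective: simpler
-- what changed: Instead of building repeated candidate strings sym*k for k=10..6 and testing substring containment in each half, B computes the longest consecutive run of each symbol in each half with one streak-counting scan and takes the minimum of the two runs.
import Mathlib
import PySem

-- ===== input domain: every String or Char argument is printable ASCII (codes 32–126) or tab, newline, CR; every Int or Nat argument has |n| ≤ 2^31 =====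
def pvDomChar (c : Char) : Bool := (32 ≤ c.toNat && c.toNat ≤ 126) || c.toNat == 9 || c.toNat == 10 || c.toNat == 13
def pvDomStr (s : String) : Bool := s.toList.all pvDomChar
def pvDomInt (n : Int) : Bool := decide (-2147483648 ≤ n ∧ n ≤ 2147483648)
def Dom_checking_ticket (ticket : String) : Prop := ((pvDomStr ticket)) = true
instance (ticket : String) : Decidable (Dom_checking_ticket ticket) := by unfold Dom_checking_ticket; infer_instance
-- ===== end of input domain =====

-- B replaces A's repeated-string substring tests (sym*k in half, k = 10..6) by one streak-counting
-- scan per half computing the longest run of each symbol; objective: simpler.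

-- ===== PORT A =====
-- inner loop 'for uninterrupted_winning_symbol in range(10, 5, -1)' with its early returns
-- ('sym * k' on the 1-char string sym is PySem.List.pyRepeat [c] k, exact)
def ckA_inner (ticket : String) (L R : List Char) (c : Char) : List Int → Option String
  | [] => none
  | k :: ks =>
    let rep := PySem.List.pyRepeat [c] k
    if PySem.Chars.isIn rep L && PySem.Chars.isIn rep R then
      if k == 10 then
        some ("ticket \"" ++ ticket ++ "\" - " ++ PySem.Int.toStr k ++ String.ofList [c] ++ " Jackpot!")
      else
        some ("ticket \"" ++ ticket ++ "\" - " ++ PySem.Int.toStr k ++ String.ofList [c])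
    else ckA_inner ticket L R c ks

-- outer loop 'for current_winning_symbol in winning_symbol'
def ckA_outer (ticket : String) (L R : List Char) : List Char → Option String
  | [] => none
  | c :: cs =>
    match ckA_inner ticket L R c (PySem.List.pyRange 10 5 (-1)) with
    | some r => some r
    | none => ckA_outer ticket L R cs

def checking_ticket (ticket : String) : String :=
  if PySem.Str.len ticket ≠ 20 then "invalid ticket"
  else
    match ckA_outer ticket (PySem.Str.slice ticket none (some 10)).toList
        (PySem.Str.slice ticket (some 10) none).toList ['@', '#', '$', '^'] with
    | some r => r
    | none => "ticket \"" ++ ticket ++ "\" - no match"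

-- ===== PORT B =====
-- one streak-scan step of Source B's _max_run: p = (best, cur)
def runStep (c : Char) (p : Nat × Nat) (x : Char) : Nat × Nat :=
  let cur := if x == c then p.2 + 1 else 0
  (max p.1 cur, cur)

-- longest consecutive run of c in l (Source B's _max_run)
def maxRun (c : Char) (l : List Char) : Nat := (l.foldl (runStep c) (0, 0)).1

def ckB_loop (ticket : String) (L R : List Char) : List Char → String
  | [] => "ticket \"" ++ ticket ++ "\" - no match"
  | c :: cs =>
    let m := min (maxRun c L) (maxRun c R)
    if m == 10 then
      "ticket \"" ++ ticket ++ "\" - " ++ PySem.Int.toStr (m : Int) ++ String.ofList [c] ++ " Jackpot!"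
    else if 6 ≤ m then
      "ticket \"" ++ ticket ++ "\" - " ++ PySem.Int.toStr (m : Int) ++ String.ofList [c]
    else ckB_loop ticket L R cs

def checking_ticket_alt (ticket : String) : String :=
  if PySem.Str.len ticket ≠ 20 then "invalid ticket"
  else
    -- ticket[:10] / ticket[10:]: exact as take/drop for these nonnegative bounds
    ckB_loop ticket (ticket.toList.take 10) (ticket.toList.drop 10) ['@', '#', '$', '^']

-- ===== PRECONDITION & SPEC =====
def Spec_checking_ticket (ticket : String) (out : String) : Prop := out = checking_ticket_alt ticket
instance (ticket : String) (out : String) : Decidable (Spec_checking_ticket ticket out) := by unfold Spec_checking_ticket; infer_instance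

-- ===== CLAIM (what is proved, stated in full; the proofs are below) =====
def Claim_equal_checking_ticket : Prop := ∀ (ticket : String), Dom_checking_ticket ticket → Spec_checking_ticket ticket (checking_ticket ticket)

-- ===== LEMMAS AND PROOFS =====
-- length of the leading run of c
def leadRun (c : Char) : List Char → Nat
  | [] => 0
  | x :: xs => if x = c then leadRun c xs + 1 else 0

-- longest run of c, recursive characterisation
def maxRunR (c : Char) : List Char → Nat
  | [] => 0
  | x :: xs => max (leadRun c (x :: xs)) (maxRunR c xs)

theorem leadRun_le_maxRunR (c : Char) (l : List Char) : leadRun c l ≤ maxRunR c l := by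
  cases l with
  | nil => simp [leadRun, maxRunR]
  | cons x xs => simp [maxRunR]

theorem replicate_prefix_iff (c : Char) (l : List Char) (k : Nat) :
    List.replicate k c <+: l ↔ k ≤ leadRun c l := by
  induction l generalizing k with
  | nil =>
    cases k with
    | zero => simp [leadRun]
    | succ n => simp [leadRun, List.replicate_succ]
  | cons x xs ih =>
    cases k with
    | zero => simp
    | succ n =>
      rw [List.replicate_succ, List.cons_prefix_cons, ih]
      by_cases hx : x = c
      · subst hx; simp [leadRun]
      · have : ¬ c = x := fun h => hx h.symm
        simp [leadRun, hx, this]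

theorem replicate_infix_iff (c : Char) (l : List Char) (k : Nat) :
    List.replicate k c <:+: l ↔ k ≤ maxRunR c l := by
  induction l with
  | nil => simp [maxRunR, List.replicate_eq_nil_iff]
  | cons x xs ih =>
    rw [List.infix_cons_iff, replicate_prefix_iff, ih]
    simp only [maxRunR]
    omega

theorem leadRun_le_length (c : Char) (l : List Char) : leadRun c l ≤ l.length := by
  induction l with
  | nil => simp [leadRun]
  | cons y ys ihy =>
    by_cases hy : y = c
    · simp [leadRun, hy]; omega
    · simp [leadRun, hy]

theorem maxRunR_le_length (c : Char) (l : List Char) : maxRunR c l ≤ l.length := by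
  induction l with
  | nil => simp [maxRunR]
  | cons x xs ih =>
    have h := leadRun_le_length c (x :: xs)
    simp only [maxRunR, List.length_cons] at *
    omega

theorem foldl_run_eq (c : Char) (l : List Char) :
    ∀ b u : Nat, u ≤ b →
      (l.foldl (runStep c) (b, u)).1 = max b (max (u + leadRun c l) (maxRunR c l)) := by
  induction l with
  | nil => intro b u hu; simp [leadRun, maxRunR]; omega
  | cons x xs ih =>
    intro b u hu
    by_cases hx : x = c
    · rw [List.foldl_cons, show runStep c (b, u) x = (max b (u + 1), u + 1) by
        simp [runStep, hx]]
      rw [ih _ _ (by omega)]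
      simp only [leadRun, maxRunR, if_pos hx]
      omega
    · rw [List.foldl_cons, show runStep c (b, u) x = (max b 0, 0) by
        simp [runStep, hx]]
      rw [ih _ _ (by omega)]
      have hle := leadRun_le_maxRunR c xs
      simp only [leadRun, maxRunR, if_neg hx]
      omega

theorem maxRun_eq (c : Char) (l : List Char) : maxRun c l = maxRunR c l := by
  have h := foldl_run_eq c l 0 0 (le_refl 0)
  have hle := leadRun_le_maxRunR c l
  unfold maxRun
  omega

theorem isIn_replicate (c : Char) (l : List Char) (k : Nat) :
    PySem.Chars.isIn (List.replicate k c) l = decide (k ≤ maxRun c l) := by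
  rw [maxRun_eq]
  by_cases h : k ≤ maxRunR c l
  · have := (replicate_infix_iff c l k).mpr h
    simp [PySem.Chars.isIn_iff_infix, this, h]
  · have : ¬ List.replicate k c <:+: l := fun hh => h ((replicate_infix_iff c l k).mp hh)
    simp [PySem.Chars.isIn_eq_false_iff, this, h]

theorem maxRun_le (c : Char) (l : List Char) (n : Nat) (h : l.length ≤ n) : maxRun c l ≤ n := by
  rw [maxRun_eq]; exact le_trans (maxRunR_le_length c l) h

theorem inner_eq (t : String) (L R : List Char) (c : Char)
    (hL : maxRun c L ≤ 10) (hR : maxRun c R ≤ 10) :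
    ckA_inner t L R c (PySem.List.pyRange 10 5 (-1)) =
      (let m := min (maxRun c L) (maxRun c R)
       if m == 10 then
         some ("ticket \"" ++ t ++ "\" - " ++ PySem.Int.toStr (m : Int) ++ String.ofList [c] ++ " Jackpot!")
       else if 6 ≤ m then
         some ("ticket \"" ++ t ++ "\" - " ++ PySem.Int.toStr (m : Int) ++ String.ofList [c])
       else none) := by
  have hrange : PySem.List.pyRange 10 5 (-1) = [10, 9, 8, 7, 6] := by decide
  rw [hrange]
  simp only [ckA_inner, PySem.List.pyRepeat_singleton, isIn_replicate]
  generalize maxRun c L = mL at *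
  generalize maxRun c R = mR at *
  interval_cases mL <;> interval_cases mR <;> rfl

theorem outer_eq (t : String) (L R : List Char)
    (hL : L.length ≤ 10) (hR : R.length ≤ 10) (syms : List Char) :
    (match ckA_outer t L R syms with
     | some r => r
     | none => "ticket \"" ++ t ++ "\" - no match") = ckB_loop t L R syms := by
  induction syms with
  | nil => rfl
  | cons c cs ih =>
    simp only [ckA_outer, inner_eq t L R c (maxRun_le c L 10 hL) (maxRun_le c R 10 hR), ckB_loop]
    by_cases h10 : min (maxRun c L) (maxRun c R) = 10
    · simp [h10]
    · by_cases h6 : 6 ≤ min (maxRun c L) (maxRun c R)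
      · simp [h10, h6]
      · simp [h10, h6, ih]

-- ===== VERDICT (by name: the statement is the Claim_ definition above) =====
theorem checking_ticket_spec : Claim_equal_checking_ticket := by
  intro ticket _
  unfold Spec_checking_ticket checking_ticket checking_ticket_alt
  have hLs : (PySem.Str.slice ticket none (some (10 : Int))).toList = ticket.toList.take 10 := by
    have := PySem.List.slice_to (xs := ticket.toList) (b := (10 : Int)) (by norm_num)
    simp [this]
  have hRs : (PySem.Str.slice ticket (some (10 : Int)) none).toList = ticket.toList.drop 10 := by
    have := PySem.List.slice_from (xs := ticket.toList) (a := (10 : Int)) (by norm_num)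
    simp [this]
  by_cases hg : ((ticket.length : Int)) = 20
  · have htl : ticket.toList.length = 20 := by
      have h1 : ticket.length = 20 := by exact_mod_cast hg
      simpa using h1
    rw [if_neg (by simp [hg]), if_neg (by simp [hg]), hLs, hRs]
    exact outer_eq ticket _ _ (by simp) (by simp [htl]) _
  · rw [if_pos (by simp [hg]), if_pos (by simp [hg])]
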